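-- pv_equiv track=rewrite | github.com/Ezrastrading/Ezras-trading-ai | trading-ai/src/trading_ai/orchestration/autonomous_blocker_normalization.py | _canonical_token
-- ===== SOURCE A (Python) =====
-- from typing import Any, Dict, Iterable, List, Mapping, Optional, Sequence, Set, Tuple, Union
--
-- _EQUIV_TO_CANONICAL: Dict[str, str] = {}
--
-- def _canonical_token(tok: str) -> str:
--     t = tok.strip()
--     low = t.lower()
--     # strip common noisy prefixes for dedup only (preserve raw separately)
--     if low.startswith("daemon_authority:"):
--         inner = t.split(":", 1)[1].strip()
--         return _canonical_token(inner) if inner else t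
--     if low.startswith("autonomous:"):
--         inner = t.split(":", 1)[1].strip()
--         return _canonical_token(inner) if inner else t
--     if low.startswith("switch_live:"):
--         return t  # keep switch detail
--     return _EQUIV_TO_CANONICAL.get(t, t)
-- ===== SOURCE B (Python) =====
-- _EQUIV_TO_CANONICAL = {}
--
--
-- def _canonical_token(tok: str) -> str:
--     # Iterative peeling by fixed prefix length (t[n:]) instead of recursion +
--     # split-at-first-colon.  The prefixes contain their only colon at the end, so
--     # slicing past the prefix equals the tail of the split; _EQUIV_TO_CANONICAL is
--     # empty and the switch_live branch returns t unchanged, so the final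
--     # answer is always the current stripped token.
--     t = tok.strip()
--     while True:
--         low = t.lower()
--         n = 17 if low.startswith("daemon_authority:") else 11 if low.startswith("autonomous:") else 0
--         if n == 0:
--             return t
--         inner = t[n:].strip()
--         if not inner:
--             return t
--         t = inner
-- ===== Notes on version B (the rewrite author's own statement) =====
-- stated objective: simpler
-- what changed: Replaced the tail recursion with split-at-first-colon call and a dict fallback by an iterative loop that peels each matched prefix by fixed-length slicing t[n:]; the switch_live branch and the empty _EQUIV_TO_CANONICAL lookup both return t, so they disappear.
import Mathlib
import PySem

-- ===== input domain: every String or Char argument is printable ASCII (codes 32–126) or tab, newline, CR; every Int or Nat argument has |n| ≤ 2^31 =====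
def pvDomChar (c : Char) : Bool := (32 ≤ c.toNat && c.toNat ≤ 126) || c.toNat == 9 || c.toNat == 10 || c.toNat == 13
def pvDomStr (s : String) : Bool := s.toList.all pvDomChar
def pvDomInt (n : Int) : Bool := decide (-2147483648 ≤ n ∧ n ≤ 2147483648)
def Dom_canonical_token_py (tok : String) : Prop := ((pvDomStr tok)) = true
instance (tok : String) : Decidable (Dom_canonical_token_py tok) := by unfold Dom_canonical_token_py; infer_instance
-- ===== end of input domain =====

-- B replaces A's tail recursion + split-at-first-colon + empty-dict fallback by an iterative fixed-length-slice peeling loop (same cost, different algorithm shape).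


-- ===== PORT A =====
-- helpers needed by the ports' termination proofs (cited by name in decreasing_by)

theorem pv_strip_len (s : List Char) : (PySem.Chars.strip s).length ≤ s.length := by
  have h1 := List.length_dropWhile_le PySem.Chars.isspace s
  have h2 := List.length_dropWhile_le PySem.Chars.isspace (List.dropWhile PySem.Chars.isspace s).reverse
  simp [PySem.Chars.strip, PySem.Chars.lstrip, PySem.Chars.rstrip] at *
  omega

theorem pv_strip_len_str (s : String) :
    (PySem.Str.strip s).toList.length ≤ s.toList.length := by
  rw [PySem.Str.toList_strip]; exact pv_strip_len s.toList

theorem pv_go_zero (f : Nat) (acc : List (List Char)) (l : List Char) :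
    PySem.Chars.splitOnMax.go [':'] f 0 l [] acc = (l :: acc).reverse := by
  cases f with
  | zero => simp [PySem.Chars.splitOnMax.go]
  | succ f => cases l <;> simp [PySem.Chars.splitOnMax.go]

theorem pv_go_one : ∀ (pre : List Char) (f : Nat) (rest cur : List Char) (acc : List (List Char)),
    pre.length + 1 ≤ f → ':' ∉ pre →
    PySem.Chars.splitOnMax.go [':'] f 1 (pre ++ ':' :: rest) cur acc
      = (rest :: (cur.reverse ++ pre) :: acc).reverse := by
  intro pre
  induction pre with
  | nil =>
    intro f rest cur acc hf _
    obtain ⟨g, rfl⟩ : ∃ g, f = g + 1 := ⟨f - 1, by omega⟩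
    simp [PySem.Chars.splitOnMax.go, List.isPrefixOf, pv_go_zero]
  | cons c p ih =>
    intro f rest cur acc hf hm
    obtain ⟨g, rfl⟩ : ∃ g, f = g + 1 := ⟨f - 1, by omega⟩
    have hc : c ≠ ':' := fun h => hm (by simp [h])
    have hc' : (':' == c) = false := by simp [hc.symm]
    rw [show ((c :: p) ++ ':' :: rest) = c :: (p ++ ':' :: rest) by simp]
    simp only [PySem.Chars.splitOnMax.go, List.isPrefixOf, hc', Bool.false_and]
    rw [if_neg (by omega : ¬ (1 : Nat) = 0)]
    rw [ih g rest (c :: cur) acc (by simp at hf ⊢; omega) (fun h => hm (by simp [h]))]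
    simp

theorem pv_splitOnMax (pre rest : List Char) (h : ':' ∉ pre) :
    PySem.Chars.splitOnMax (pre ++ ':' :: rest) [':'] 1 = [pre, rest] := by
  unfold PySem.Chars.splitOnMax
  rw [if_neg (by omega : ¬ (1 : Int) < 0)]
  rw [Int.toNat_one]
  rw [pv_go_one pre ((pre ++ ':' :: rest).length + 1) rest [] [] (by simp) h]
  simp

theorem pv_lowerChar_colon (c : Char) (h : PySem.Chars.lowerChar c = ':') : c = ':' := by
  unfold PySem.Chars.lowerChar at h
  by_cases hu : PySem.Chars.isupper c = true
  · exfalso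
    have hb : 65 ≤ c.toNat ∧ c.toNat ≤ 90 := by
      simp only [PySem.Chars.isupper, Bool.and_eq_true, decide_eq_true_eq] at hu
      obtain ⟨h1, h2⟩ := hu
      rw [Char.le_def] at h1 h2
      rw [UInt32.le_iff_toNat_le] at h1 h2
      exact ⟨h1, h2⟩
    rw [if_pos hu] at h
    have hval : Nat.isValidChar (c.toNat + 32) := Or.inl (by omega)
    have h2 := congrArg Char.toNat h
    rw [Char.toNat_ofNat, if_pos hval] at h2
    have : (':' : Char).toNat = 58 := by decide
    omega
  · rw [if_neg hu] at h; exact h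

theorem pv_peel (P t : List Char) (hP : ':' ∉ P)
    (h : PySem.Chars.startswith (PySem.Chars.lower t) (P ++ [':']) = true) :
    ∃ pre rest, t = pre ++ ':' :: rest ∧ ':' ∉ pre ∧ PySem.Chars.lower pre = P := by
  rw [PySem.Chars.startswith_iff] at h
  obtain ⟨z, hz⟩ := h
  rw [PySem.Chars.lower] at hz
  rw [List.append_assoc] at hz
  obtain ⟨a, b, hab, ha, hb⟩ := List.map_eq_append_iff.mp hz.symm
  obtain ⟨c, b', hbc, hcc, -⟩ := List.map_eq_cons_iff.mp hb
  have hc : c = ':' := pv_lowerChar_colon c hcc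
  refine ⟨a, b', by rw [hab, hbc, hc], ?_, ha⟩
  intro hmem
  apply hP
  rw [← ha]
  have : PySem.Chars.lowerChar ':' = ':' := by decide
  exact List.mem_map.mpr ⟨':', hmem, this⟩

theorem pv_inner_lt' (t p : String) (P : List Char)
    (hp : p.toList = P ++ [':']) (hP : ':' ∉ P)
    (h : PySem.Str.startswith (PySem.Str.lower t) p = true) :
    (PySem.Str.strip ((PySem.List.pyGet? ((PySem.Str.splitMax? t ":" 1).getD []) 1).getD "")).toList.length
      < t.toList.length := by
  rw [PySem.Str.startswith_eq, hp] at h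
  rw [show (PySem.Str.lower t).toList = PySem.Chars.lower t.toList from PySem.Str.toList_lower t] at h
  obtain ⟨pre, rest, ht, hpre, -⟩ := pv_peel P t.toList hP h
  have hsplit : PySem.Str.splitMax? t ":" 1
      = some [String.ofList pre, String.ofList rest] := by
    unfold PySem.Str.splitMax?
    rw [show (":" : String).toList = [':'] from rfl]
    unfold PySem.Chars.splitMax?
    rw [if_neg (by simp)]
    rw [ht, pv_splitOnMax pre rest hpre]
    rfl
  rw [hsplit]
  simp only [Option.getD_some]
  rw [show PySem.List.pyGet? [String.ofList pre, String.ofList rest] 1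
        = some (String.ofList rest) by rfl]
  simp only [Option.getD_some]
  have hlen : (PySem.Str.strip (String.ofList rest)).toList.length ≤ rest.length := by
    have := pv_strip_len_str (String.ofList rest)
    simpa using this
  have : t.toList.length = pre.length + 1 + rest.length := by
    rw [ht]; simp; omega
  omega

def EQUIV_TO_CANONICAL : PySem.Dict String String := PySem.Dict.ofList []

def canonical_token_py (tok : String) : String :=
  let t := PySem.Str.strip tok
  let low := PySem.Str.lower t
  if h1 : PySem.Str.startswith low "daemon_authority:" = true then
    let inner := PySem.Str.strip ((PySem.List.pyGet? ((PySem.Str.splitMax? t ":" 1).getD []) 1).getD "")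
    if inner ≠ "" then canonical_token_py inner else t
  else if h2 : PySem.Str.startswith low "autonomous:" = true then
    let inner := PySem.Str.strip ((PySem.List.pyGet? ((PySem.Str.splitMax? t ":" 1).getD []) 1).getD "")
    if inner ≠ "" then canonical_token_py inner else t
  else if PySem.Str.startswith low "switch_live:" = true then t
  else PySem.Dict.getD EQUIV_TO_CANONICAL t t
termination_by tok.toList.length
decreasing_by
  · exact lt_of_lt_of_le
      (pv_inner_lt' (PySem.Str.strip tok) "daemon_authority:" "daemon_authority".toList (by decide) (by decide) h1)
      (pv_strip_len_str tok)
  · exact lt_of_lt_of_le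
      (pv_inner_lt' (PySem.Str.strip tok) "autonomous:" "autonomous".toList (by decide) (by decide) h2)
      (pv_strip_len_str tok)

-- ===== PORT B =====
-- helper cited by the loop's decreasing_by: a startswith bounds the string length from below
theorem pv_sw_len (s p : String) (h : PySem.Str.startswith s p = true) :
    p.toList.length ≤ s.toList.length := by
  rw [PySem.Str.startswith_eq, PySem.Chars.startswith_iff] at h
  exact h.length_le

theorem pv_lower_len (t : String) :
    (PySem.Str.lower t).toList.length = t.toList.length := by
  rw [PySem.Str.toList_lower]; simp [PySem.Chars.lower]

theorem pv_slice_strip_lt (t : String) (n : Nat) (h0 : n ≠ 0) (hle : n ≤ t.toList.length) :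
    (PySem.Str.strip (PySem.Str.slice t (some (n : Int)) none)).toList.length < t.toList.length := by
  have h1 := pv_strip_len_str (PySem.Str.slice t (some (n : Int)) none)
  have h2 : (PySem.Str.slice t (some (n : Int)) none).toList = t.toList.drop n := by
    rw [PySem.Str.toList_slice, PySem.Chars.slice_eq_listSlice, PySem.List.slice_from_natCast]
  rw [h2, List.length_drop] at h1
  omega

-- the iterative loop of Source B over the current (already stripped) token
def canonical_token_py_alt_loop (t : String) : String :=
  let low := PySem.Str.lower t
  let n : Nat := if PySem.Str.startswith low "daemon_authority:" = true then 17
                 else if PySem.Str.startswith low "autonomous:" = true then 11 else 0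
  if hn : n = 0 then t
  else
    let inner := PySem.Str.strip (PySem.Str.slice t (some (n : Int)) none)
    if inner = "" then t
    else canonical_token_py_alt_loop inner
termination_by t.toList.length
decreasing_by
  · refine pv_slice_strip_lt t _ hn ?_
    by_cases hd : PySem.Str.startswith (PySem.Str.lower t) "daemon_authority:" = true
    · simp only [hd, if_true]
      calc (17 : Nat) = ("daemon_authority:" : String).toList.length := by decide
        _ ≤ (PySem.Str.lower t).toList.length := pv_sw_len _ _ hd
        _ = t.toList.length := pv_lower_len t
    · by_cases ha : PySem.Str.startswith (PySem.Str.lower t) "autonomous:" = true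
      · simp only [hd, ha, if_false, if_true]
        calc (11 : Nat) = ("autonomous:" : String).toList.length := by decide
          _ ≤ (PySem.Str.lower t).toList.length := pv_sw_len _ _ ha
          _ = t.toList.length := pv_lower_len t
      · exact absurd (show n = 0 by
        rw [show n = (if PySem.Str.startswith (PySem.Str.lower t) "daemon_authority:" = true then (17:Nat)
              else if PySem.Str.startswith (PySem.Str.lower t) "autonomous:" = true then 11 else 0) from rfl,
            if_neg hd, if_neg ha]) hn

def canonical_token_py_alt (tok : String) : String :=
  canonical_token_py_alt_loop (PySem.Str.strip tok)

-- ===== PRECONDITION & SPEC =====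
def Spec_canonical_token_py (tok : String) (out : String) : Prop := out = canonical_token_py_alt tok
instance (tok : String) (out : String) : Decidable (Spec_canonical_token_py tok out) := by unfold Spec_canonical_token_py; infer_instance

-- ===== CLAIM (what is proved, stated in full; the proofs are below) =====
def Claim_equal_canonical_token_py : Prop := ∀ (tok : String), Dom_canonical_token_py tok → Spec_canonical_token_py tok (canonical_token_py tok)

-- ===== LEMMAS AND PROOFS =====

theorem pv_dw_idem {α : Type} (p : α → Bool) (l : List α) :
    List.dropWhile p (List.dropWhile p l) = List.dropWhile p l := by
  induction l with
  | nil => simp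
  | cons a l ih => by_cases h : p a <;> simp [h, ih]

theorem pv_dw_of_head {α : Type} (p : α → Bool) (v : List α)
    (h : ∀ c ∈ v.head?, p c = false) : List.dropWhile p v = v := by
  cases v with
  | nil => rfl
  | cons a v => simp [h a (by simp)]

theorem pv_dw_head {α : Type} (p : α → Bool) (l : List α) :
    ∀ c ∈ (List.dropWhile p l).head?, p c = false := by
  induction l with
  | nil => simp
  | cons a l ih =>
    by_cases h : p a
    · simpa [h] using ih
    · intro c hc
      simp [h] at hc
      rw [← hc]; simpa using h

theorem pv_rstrip_head {α : Type} (p : α → Bool) (u : List α)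
    (hu : ∀ c ∈ u.head?, p c = false) :
    ∀ c ∈ ((List.dropWhile p u.reverse).reverse).head?, p c = false := by
  intro c hc
  obtain ⟨tl, htl⟩ := List.dropWhile_suffix (l := u.reverse) (p := p)
  have hu' : u = (List.dropWhile p u.reverse).reverse ++ tl.reverse := by
    have := congrArg List.reverse htl
    simpa [List.reverse_append] using this.symm
  cases hw : (List.dropWhile p u.reverse).reverse with
  | nil => simp [hw] at hc
  | cons d w =>
    rw [hw] at hc; simp at hc; subst hc
    apply hu
    rw [hu', hw]; simp

theorem pv_strip_idem (s : List Char) :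
    PySem.Chars.strip (PySem.Chars.strip s) = PySem.Chars.strip s := by
  simp only [PySem.Chars.strip, PySem.Chars.lstrip, PySem.Chars.rstrip]
  rw [pv_dw_of_head _ _ (pv_rstrip_head _ _ (pv_dw_head _ s))]
  rw [List.reverse_reverse, pv_dw_idem]

theorem pv_strip_idem_str (s : String) :
    PySem.Str.strip (PySem.Str.strip s) = PySem.Str.strip s := by
  have h : (PySem.Str.strip (PySem.Str.strip s)).toList = (PySem.Str.strip s).toList := by
    rw [PySem.Str.toList_strip, PySem.Str.toList_strip, pv_strip_idem]
  exact String.toList_injective h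

-- when t (lowercased) starts with P ++ ":", split-at-first-colon[1] is exactly t[|P|+1:]
theorem pv_split_eq_drop (t p : String) (P : List Char)
    (hp : p.toList = P ++ [':']) (hP : ':' ∉ P)
    (h : PySem.Str.startswith (PySem.Str.lower t) p = true) :
    ((PySem.List.pyGet? ((PySem.Str.splitMax? t ":" 1).getD []) 1).getD "")
      = String.ofList (t.toList.drop (P.length + 1)) := by
  rw [PySem.Str.startswith_eq, hp] at h
  rw [show (PySem.Str.lower t).toList = PySem.Chars.lower t.toList from PySem.Str.toList_lower t] at h
  obtain ⟨pre, rest, ht, hpre, hlowpre⟩ := pv_peel P t.toList hP h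
  have hsplit : PySem.Str.splitMax? t ":" 1
      = some [String.ofList pre, String.ofList rest] := by
    unfold PySem.Str.splitMax?
    rw [show (":" : String).toList = [':'] from rfl]
    unfold PySem.Chars.splitMax?
    rw [if_neg (by simp)]
    rw [ht, pv_splitOnMax pre rest hpre]
    rfl
  rw [hsplit]
  simp only [Option.getD_some]
  rw [show PySem.List.pyGet? [String.ofList pre, String.ofList rest] 1
        = some (String.ofList rest) by rfl]
  simp only [Option.getD_some]
  have hlen : pre.length = P.length := by
    rw [← hlowpre]; simp [PySem.Chars.lower]
  have hdrop : t.toList.drop (P.length + 1) = rest := by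
    rw [ht, ← hlen, show pre ++ ':' :: rest = (pre ++ [':']) ++ rest by simp,
        show pre.length + 1 = (pre ++ [':']).length by simp]
    exact List.drop_left
  rw [hdrop]

theorem pv_empty_dict (t : String) : PySem.Dict.getD EQUIV_TO_CANONICAL t t = t := by
  simp [EQUIV_TO_CANONICAL, PySem.Dict.getD, PySem.Dict.get?, PySem.Dict.ofList, PySem.Dict.empty, PySem.Dict.update]

set_option maxHeartbeats 1000000 in
theorem pv_main : ∀ (n : Nat) (tok : String), tok.toList.length < n →
    canonical_token_py tok = canonical_token_py_alt_loop (PySem.Str.strip tok) := by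
  intro n
  induction n with
  | zero => intro tok h; omega
  | succ n ih =>
    intro tok hlen
    rw [canonical_token_py, canonical_token_py_alt_loop]
    set t := PySem.Str.strip tok with ht
    by_cases h1 : PySem.Str.startswith (PySem.Str.lower t) "daemon_authority:" = true
    · rw [dif_pos h1]
      simp only [h1, if_true]
      rw [dif_neg (by omega : ¬ (17 : Nat) = 0)]
      have hinner : ((PySem.List.pyGet? ((PySem.Str.splitMax? t ":" 1).getD []) 1).getD "")
          = PySem.Str.slice t (some ((17 : Nat) : Int)) none := by
        rw [pv_split_eq_drop t "daemon_authority:" "daemon_authority".toList (by decide) (by decide) h1]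
        apply String.toList_injective
        rw [PySem.Str.toList_slice, PySem.Chars.slice_eq_listSlice,
            PySem.List.slice_from_natCast]
        simp
      rw [hinner]
      set inner := PySem.Str.strip (PySem.Str.slice t (some ((17 : Nat) : Int)) none) with hin
      by_cases hi : inner = ""
      · rw [if_neg (show ¬ inner ≠ "" from not_not_intro hi), if_pos hi]
      · rw [if_pos hi, if_neg hi]
        have hlt : inner.toList.length < n := by
          have ha := pv_slice_strip_lt t 17 (by omega)
            (by calc (17 : Nat) = ("daemon_authority:" : String).toList.length := by decide
                  _ ≤ (PySem.Str.lower t).toList.length := pv_sw_len _ _ h1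
                  _ = t.toList.length := pv_lower_len t)
          have htl : t.toList.length ≤ tok.toList.length := by rw [ht]; exact pv_strip_len_str tok
          rw [← hin] at ha
          omega
        rw [ih inner hlt, hin, pv_strip_idem_str]
    · by_cases h2 : PySem.Str.startswith (PySem.Str.lower t) "autonomous:" = true
      · rw [dif_neg h1, dif_pos h2]
        simp only [h1, h2, Bool.false_eq_true, if_false, if_true]
        rw [dif_neg (by omega : ¬ (11 : Nat) = 0)]
        have hinner : ((PySem.List.pyGet? ((PySem.Str.splitMax? t ":" 1).getD []) 1).getD "")
            = PySem.Str.slice t (some ((11 : Nat) : Int)) none := by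
          rw [pv_split_eq_drop t "autonomous:" "autonomous".toList (by decide) (by decide) h2]
          apply String.toList_injective
          rw [PySem.Str.toList_slice, PySem.Chars.slice_eq_listSlice,
              PySem.List.slice_from_natCast]
          simp
        rw [hinner]
        set inner := PySem.Str.strip (PySem.Str.slice t (some ((11 : Nat) : Int)) none) with hin
        by_cases hi : inner = ""
        · rw [if_neg (show ¬ inner ≠ "" from not_not_intro hi), if_pos hi]
        · rw [if_pos hi, if_neg hi]
          have hlt : inner.toList.length < n := by
            have ha := pv_slice_strip_lt t 11 (by omega)
              (by calc (11 : Nat) = ("autonomous:" : String).toList.length := by decide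
                    _ ≤ (PySem.Str.lower t).toList.length := pv_sw_len _ _ h2
                    _ = t.toList.length := pv_lower_len t)
            have htl : t.toList.length ≤ tok.toList.length := by rw [ht]; exact pv_strip_len_str tok
            rw [← hin] at ha
            omega
          rw [ih inner hlt, hin, pv_strip_idem_str]
      · rw [dif_neg h1, dif_neg h2]
        simp only [h1, h2, Bool.false_eq_true, if_false, if_true]
        rw [dif_pos trivial]
        by_cases h3 : PySem.Str.startswith (PySem.Str.lower t) "switch_live:" = true
        · rw [if_pos h3]
        · rw [if_neg h3, pv_empty_dict]

-- ===== VERDICT (by name: the statement is the Claim_ definition above) =====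
theorem canonical_token_py_spec : Claim_equal_canonical_token_py := by
  intro tok _
  unfold Spec_canonical_token_py canonical_token_py_alt
  exact pv_main (tok.toList.length + 1) tok (by omega)
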